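-- pv_equiv track=rewrite | github.com/Karim4312/regulatory-fragility-promoters | scan_promoter_motifs.py | collapse_positions
-- ===== SOURCE A (Python) =====
-- def collapse_positions(positions, window=5):
--     if not positions:
--         return []
--     clusters = [[positions[0]]]
--     for pos in positions[1:]:
--         if pos - clusters[-1][-1] <= window:
--             clusters[-1].append(pos)
--         else:
--             clusters.append([pos])
--     return [min(cluster) for cluster in clusters]
-- ===== SOURCE B (Python) =====
-- def collapse_positions(positions, window=5):
--     # Build the output back-to-front: scan positions right-to-left, keeping the
--     # cluster minima in reverse order; rev[-1] is the running minimum of the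
--     # cluster currently being formed. One final reversal yields the answer.
--     rev = []
--     nxt = None
--     for pos in reversed(positions):
--         if nxt is not None and nxt - pos <= window:
--             rev[-1] = min(rev[-1], pos)
--         else:
--             rev.append(pos)
--         nxt = pos
--     return rev[::-1]
-- ===== Notes on version B (the rewrite author's own statement) =====
-- stated objective: alternative
-- what changed: Instead of A's forward pass that materializes nested cluster lists and then maps min over each, B scans the positions right-to-left and builds the output back-to-front: it keeps only the cluster minima (in reverse order), updating the last one in place, and reverses once at the end — no cluster lists and no second min pass exist.
import Mathlib
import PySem

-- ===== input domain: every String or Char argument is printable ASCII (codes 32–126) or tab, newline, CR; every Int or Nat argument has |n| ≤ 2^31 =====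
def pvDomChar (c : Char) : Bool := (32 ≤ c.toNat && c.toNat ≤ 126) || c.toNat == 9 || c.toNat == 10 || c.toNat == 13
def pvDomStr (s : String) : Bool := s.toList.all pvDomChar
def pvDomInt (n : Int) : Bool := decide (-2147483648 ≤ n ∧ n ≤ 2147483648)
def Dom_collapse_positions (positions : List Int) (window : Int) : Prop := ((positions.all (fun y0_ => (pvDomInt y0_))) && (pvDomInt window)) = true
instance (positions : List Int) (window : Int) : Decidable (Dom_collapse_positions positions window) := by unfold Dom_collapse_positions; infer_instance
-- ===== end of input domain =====

-- B replaces A's forward pass (nested cluster lists, then min of each) by a right-to-left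
-- scan that builds the output back-to-front, the result head being the running cluster minimum.

-- ===== PORT A =====
def collapse_positions (positions : List Int) (window : Int) : List Int :=
  match positions with
  | [] => []
  | p :: rest =>
    -- clusters = [[positions[0]]]; for pos in positions[1:]: …
    let clusters := rest.foldl (fun clusters pos =>
      -- clusters[-1] and clusters[-1][-1]; both indexings always succeed here
      -- (clusters and its member lists are nonempty by construction), so .getD is exact
      let lastC := (PySem.List.pyGet? clusters (-1)).getD []
      let lastE := (PySem.List.pyGet? lastC (-1)).getD 0
      if pos - lastE ≤ window then
        clusters.dropLast ++ [lastC ++ [pos]]   -- clusters[-1].append(pos)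
      else
        clusters ++ [[pos]]) [[p]]
    -- [min(cluster) for cluster in clusters]; clusters are nonempty, so .getD is exact
    clusters.map (fun c => (PySem.List.min? c (fun y => y)).getD 0)

-- ===== PORT B =====
def collapse_positions_alt (positions : List Int) (window : Int) : List Int :=
  -- for pos in reversed(positions): state = (rev, nxt)
  let s := positions.reverse.foldl (fun (s : List Int × Option Int) pos =>
    match s.2 with
    | some n =>
      if n - pos ≤ window then
        -- rev[-1] = min(rev[-1], pos); rev is nonempty here, so .getD is exact
        (s.1.dropLast ++ [min ((PySem.List.pyGet? s.1 (-1)).getD 0) pos], some pos)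
      else
        (s.1 ++ [pos], some pos)
    | none => (s.1 ++ [pos], some pos)) ([], none)
  (PySem.List.slice? s.1 none none (-1)).getD []   -- rev[::-1]

-- ===== PRECONDITION & SPEC =====
def Spec_collapse_positions (positions : List Int) (window : Int) (out : List Int) : Prop := out = collapse_positions_alt positions window
instance (positions : List Int) (window : Int) (out : List Int) : Decidable (Spec_collapse_positions positions window out) := by unfold Spec_collapse_positions; infer_instance

-- ===== CLAIM (what is proved, stated in full; the proofs are below) =====
def Claim_equal_collapse_positions : Prop := ∀ (positions : List Int) (window : Int), Dom_collapse_positions positions window → Spec_collapse_positions positions window (collapse_positions positions window)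

-- ===== LEMMAS AND PROOFS =====

-- reference segmentation by the adjacent-gap relation, recursing on the front
def pvRef (w : Int) : List Int → List Int
  | [] => []
  | [p] => [p]
  | p :: q :: t =>
    if q - p ≤ w then
      match pvRef w (q :: t) with
      | [] => [p]            -- unreachable
      | m :: ms => min p m :: ms
    else p :: pvRef w (q :: t)

lemma pvRef_shape (w p : Int) (t : List Int) :
    ∃ m ms, pvRef w (p :: t) = m :: ms ∧ m ≤ p := by
  induction t generalizing p with
  | nil => exact ⟨p, [], rfl, le_refl p⟩
  | cons q t ih =>
    obtain ⟨m, ms, hq, hm⟩ := ih q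
    by_cases h : q - p ≤ w
    · exact ⟨min p m, ms, by simp [pvRef, h, hq], min_le_left _ _⟩
    · exact ⟨p, pvRef w (q :: t), by simp [pvRef, h], le_refl p⟩

-- min(cluster) as A's port computes it (cluster always nonempty where used)
def pvMinD (c : List Int) : Int := (PySem.List.min? c (fun y => y)).getD 0

lemma pvMinD_cons (x : Int) (t : List Int) : pvMinD (x :: t) = t.foldl min x := by
  simp [pvMinD, PySem.List.min?_id_cons]

lemma pvMinD_concat (c : List Int) (hc : c ≠ []) (p : Int) :
    pvMinD (c ++ [p]) = min (pvMinD c) p := by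
  obtain ⟨x, t, rfl⟩ := List.exists_cons_of_ne_nil hc
  simp [pvMinD_cons]

lemma pvFoldlMin_le_init (l : List Int) (x : Int) : l.foldl min x ≤ x := by
  induction l generalizing x with
  | nil => simp
  | cons a t ih => exact le_trans (ih (min x a)) (min_le_left x a)

lemma pvFoldlMin_le_mem (l : List Int) : ∀ x y, y ∈ l → l.foldl min x ≤ y := by
  induction l with
  | nil => intro x y h; cases h
  | cons a t ih =>
    intro x y h
    rcases List.mem_cons.mp h with rfl | h
    · exact le_trans (pvFoldlMin_le_init t (min x y)) (min_le_right x y)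
    · exact ih (min x a) y h

lemma pvMinD_le_getLast (c : List Int) (hc : c ≠ []) : pvMinD c ≤ c.getLast hc := by
  obtain ⟨x, t, rfl⟩ := List.exists_cons_of_ne_nil hc
  rw [pvMinD_cons]
  rcases List.mem_cons.mp (List.getLast_mem hc) with h | h
  · rw [h]; exact pvFoldlMin_le_init t x
  · exact pvFoldlMin_le_mem t x _ h

-- helper used in pvA_loop's base/step bookkeeping: merge a pending minimum into the head
def pvMerge (m : Int) : List Int → List Int
  | [] => [m]
  | h :: t => min m h :: t

-- A's loop invariant: with clusters split as cs ++ [c], the final minima are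
-- cs.map pvMinD followed by pvRef on (getLast c :: rest) with pvMinD c merged in.
lemma pvA_loop (window : Int) (rest : List Int) :
    ∀ (cs : List (List Int)) (c : List Int) (hc : c ≠ []),
    (rest.foldl (fun clusters pos =>
      let lastC := (PySem.List.pyGet? clusters (-1)).getD []
      let lastE := (PySem.List.pyGet? lastC (-1)).getD 0
      if pos - lastE ≤ window then
        clusters.dropLast ++ [lastC ++ [pos]]
      else
        clusters ++ [[pos]]) (cs ++ [c])).map pvMinD =
    cs.map pvMinD ++ pvMerge (pvMinD c) (pvRef window (c.getLast hc :: rest)) := by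
  induction rest with
  | nil =>
    intro cs c hc
    simp [pvRef, pvMerge]
    exact pvMinD_le_getLast c hc
  | cons pos rest ih =>
    intro cs c hc
    simp only [List.foldl_cons]
    have h1 : (PySem.List.pyGet? (cs ++ [c]) (-1)).getD [] = c := by
      simp [PySem.List.pyGet?_neg_one_append_singleton]
    have h2 : (PySem.List.pyGet? c (-1)).getD 0 = c.getLast hc := by
      simp [PySem.List.pyGet?_neg_one, List.getLast?_eq_some_getLast hc]
    rw [h1, h2]
    obtain ⟨m, ms, hr, hm⟩ := pvRef_shape window pos rest
    by_cases h : pos - c.getLast hc ≤ window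
    · rw [if_pos h, List.dropLast_concat, ih cs (c ++ [pos]) (by simp)]
      have hlast : (c ++ [pos]).getLast (by simp) = pos := by simp
      rw [hlast, pvMinD_concat c hc pos]
      have hpr : pvRef window (c.getLast hc :: pos :: rest) = min (c.getLast hc) m :: ms := by
        simp [pvRef, h, hr]
      rw [hpr, hr]
      simp only [pvMerge]
      have h1 : pvMinD c ≤ c.getLast hc := pvMinD_le_getLast c hc
      congr 2
      omega
    · rw [if_neg h, ih (cs ++ [c]) [pos] (by simp)]
      have hpr : pvRef window (c.getLast hc :: pos :: rest) = c.getLast hc :: m :: ms := by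
        simp [pvRef, h, hr]
      rw [List.getLast_singleton, hr, hpr]
      have hps : pvMinD [pos] = pos := by simp [pvMinD_cons]
      rw [hps]
      simp only [pvMerge, List.map_append, List.map_cons, List.map_nil]
      rw [min_eq_right hm, min_eq_left (pvMinD_le_getLast c hc)]
      simp

-- B's loop invariant: the foldr form of the reversed foldl computes (pvRef, head?)
lemma pvB_loop (window : Int) (l : List Int) :
    l.foldr (fun pos (s : List Int × Option Int) =>
      match s.2 with
      | some n =>
        if n - pos ≤ window then
          (s.1.dropLast ++ [min ((PySem.List.pyGet? s.1 (-1)).getD 0) pos], some pos)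
        else
          (s.1 ++ [pos], some pos)
      | none => (s.1 ++ [pos], some pos)) ([], none) =
    ((pvRef window l).reverse, l.head?) := by
  induction l with
  | nil => simp [pvRef]
  | cons p t ih =>
    rw [List.foldr_cons, ih]
    cases t with
    | nil => simp [pvRef]
    | cons q u =>
      obtain ⟨m, ms, hq, hm⟩ := pvRef_shape window q u
      simp only [List.head?_cons]
      by_cases h : q - p ≤ window
      · simp [h, hq, pvRef, PySem.List.pyGet?_neg_one_append_singleton, min_comm m p]
      · simp [h, hq, pvRef]

-- ===== VERDICT (by name: the statement is the Claim_ definition above) =====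
theorem collapse_positions_spec : Claim_equal_collapse_positions := by
  intro positions window _
  unfold Spec_collapse_positions collapse_positions collapse_positions_alt
  rw [List.foldl_reverse]
  match positions with
  | [] => rfl
  | p :: rest =>
    simp only
    rw [pvB_loop]
    obtain ⟨m, ms, hr, hm⟩ := pvRef_shape window p rest
    have hA := pvA_loop window rest [] [p] (by simp)
    simp only [List.nil_append, List.map_nil, List.getLast_singleton] at hA
    rw [hr] at hA
    have hp : pvMinD [p] = p := by simp [pvMinD_cons]
    rw [hp] at hA
    simp only [pvMerge, min_eq_right hm] at hA
    rw [PySem.List.slice?_none_none_neg_one]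
    simp only [Option.getD_some, List.reverse_reverse, hr]
    exact hA
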